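-- pv_equiv track=rewrite | github.com/edwyrl/trading_agent_ultra | signals/plugins/common.py | cooldown_events
-- ===== SOURCE A (Python) =====
-- def cooldown_events(flags: list[bool], cooldown: int) -> list[bool]:
--     out = [False for _ in flags]
--     last_index = -cooldown - 1
--     for index, flag in enumerate(flags):
--         if not flag:
--             continue
--         if (index - last_index) <= cooldown:
--             continue
--         out[index] = True
--         last_index = index
--     return out
-- ===== SOURCE B (Python) =====
-- def cooldown_events(flags: list[bool], cooldown: int) -> list[bool]:
--     n = len(flags)
--     out = [False] * n
--     stride = max(cooldown, 0) + 1
--     i = 0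
--     while i < n:
--         if flags[i]:
--             out[i] = True
--             i += stride  # jump past the whole cooldown window
--         else:
--             i += 1
--     return out
-- ===== Notes on version B (the rewrite author's own statement) =====
-- stated objective: faster
-- what changed: Replaces the per-element scan with last-fired-index state by a stateless index-jumping while loop: on acceptance the scan index jumps by max(cooldown,0)+1, skipping the blocked window entirely instead of examining and rejecting each flag inside it.
import Mathlib
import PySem

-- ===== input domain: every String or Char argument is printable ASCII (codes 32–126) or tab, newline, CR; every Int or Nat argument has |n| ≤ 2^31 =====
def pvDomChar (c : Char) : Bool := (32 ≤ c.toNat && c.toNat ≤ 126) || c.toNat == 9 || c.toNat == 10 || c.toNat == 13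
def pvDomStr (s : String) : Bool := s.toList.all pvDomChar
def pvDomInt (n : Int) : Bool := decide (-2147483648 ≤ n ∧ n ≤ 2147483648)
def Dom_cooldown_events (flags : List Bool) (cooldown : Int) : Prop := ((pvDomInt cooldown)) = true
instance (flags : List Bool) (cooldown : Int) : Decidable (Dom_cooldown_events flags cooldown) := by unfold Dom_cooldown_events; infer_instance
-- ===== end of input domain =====

-- B replaces A's per-element scan with last-fired-index state by an index-jumping loop
-- that skips the blocked window after each acceptance; same values, measured constant-factor faster.

-- ===== PORT A =====
def cooldown_events (flags : List Bool) (cooldown : Int) : List Bool :=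
  let out := flags.map (fun _ => false)
  (( PySem.List.enumerate flags ).foldl
    (fun (st : List Bool × Int) (p : Int × Bool) =>
      if !p.2 then st
      else if p.1 - st.2 ≤ cooldown then st
      else (st.1.set p.1.toNat true, p.1))
    (out, -cooldown - 1)).1

-- ===== PORT B =====
-- while-loop of Source B: jump the index by skip+1 (= stride = max(cooldown,0)+1) on acceptance
def cooldownGo (flags : List Bool) (skip : Nat) (out : List Bool) (i : Nat) : List Bool :=
  if h : i < flags.length then
    if flags[i] then cooldownGo flags skip (out.set i true) (i + skip + 1)
    else cooldownGo flags skip out (i + 1)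
  else out
termination_by flags.length - i

def cooldown_events_alt (flags : List Bool) (cooldown : Int) : List Bool :=
  cooldownGo flags (max cooldown 0).toNat (List.replicate flags.length false) 0

-- ===== PRECONDITION & SPEC =====
def Spec_cooldown_events (flags : List Bool) (cooldown : Int) (out : List Bool) : Prop := out = cooldown_events_alt flags cooldown
instance (flags : List Bool) (cooldown : Int) (out : List Bool) : Decidable (Spec_cooldown_events flags cooldown out) := by unfold Spec_cooldown_events; infer_instance

-- ===== CLAIM =====
def Claim_equal_cooldown_events : Prop := ∀ (flags : List Bool) (cooldown : Int), Dom_cooldown_events flags cooldown → Spec_cooldown_events flags cooldown (cooldown_events flags cooldown)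

-- ===== LEMMAS AND PROOFS =====

-- A's loop leaves its state untouched over a whole segment inside the cooldown window.
theorem cd_blocked (cd : Int) (xs : List Bool) : ∀ (j : Int) (out : List Bool) (li : Int),
    j + xs.length ≤ li + cd + 1 →
    (PySem.List.enumerate xs j).foldl
      (fun (st : List Bool × Int) (p : Int × Bool) =>
        if !p.2 then st
        else if p.1 - st.2 ≤ cd then st
        else (st.1.set p.1.toNat true, p.1))
      (out, li) = (out, li) := by
  induction xs with
  | nil => intro j out li _; simp [PySem.List.enumerate_nil]
  | cons a xs ih =>
    intro j out li h
    rw [PySem.List.enumerate_cons, List.foldl_cons]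
    have hle : j - li ≤ cd := by simp [List.length_cons] at h; omega
    have hstep :
        (if !a then ((out, li) : List Bool × Int)
         else if j - li ≤ cd then (out, li)
         else (out.set j.toNat true, j)) = (out, li) := by
      cases a <;> simp [hle]
    simp only [hstep]
    exact ih (j + 1) out li (by simp [List.length_cons] at h ⊢; omega)

theorem cooldownGo_of_ge (flags : List Bool) (skip : Nat) (out : List Bool) (i : Nat)
    (h : ¬ i < flags.length) : cooldownGo flags skip out i = out := by
  rw [cooldownGo]; simp [h]

theorem cooldownGo_true (flags : List Bool) (skip : Nat) (out : List Bool) (i : Nat)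
    (h : i < flags.length) (hf : flags[i] = true) :
    cooldownGo flags skip out i = cooldownGo flags skip (out.set i true) (i + skip + 1) := by
  rw [cooldownGo]; simp [h, hf]

theorem cooldownGo_false (flags : List Bool) (skip : Nat) (out : List Bool) (i : Nat)
    (h : i < flags.length) (hf : flags[i] = false) :
    cooldownGo flags skip out i = cooldownGo flags skip out (i + 1) := by
  rw [cooldownGo]; simp [h, hf]

-- Main correspondence: A's fold over the suffix from i equals B's jumping loop at i,
-- provided position i is already past the cooldown window of last_index li.
theorem cd_main (cd : Int) (flags : List Bool) : ∀ (fuel i : Nat) (out : List Bool) (li : Int),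
    flags.length - i ≤ fuel → cd < (i : Int) - li →
    ((PySem.List.enumerate (flags.drop i) (i : Int)).foldl
      (fun (st : List Bool × Int) (p : Int × Bool) =>
        if !p.2 then st
        else if p.1 - st.2 ≤ cd then st
        else (st.1.set p.1.toNat true, p.1))
      (out, li)).1 = cooldownGo flags (max cd 0).toNat out i := by
  intro fuel
  induction fuel with
  | zero =>
    intro i out li hfuel _
    have hge : ¬ i < flags.length := by omega
    rw [List.drop_eq_nil_of_le (by omega), cooldownGo_of_ge _ _ _ _ hge]
    simp [PySem.List.enumerate_nil]
  | succ fuel ih =>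
    intro i out li hfuel hgap
    by_cases hi : i < flags.length
    · rw [List.drop_eq_getElem_cons hi, PySem.List.enumerate_cons, List.foldl_cons]
      by_cases hf : flags[i] = true
      · -- accept: A sets index i and records it; B sets and jumps by skip+1
        have hgt : ¬ ((i : Int) - li ≤ cd) := by omega
        have htn : ((i : Int)).toNat = i := Int.toNat_natCast i
        simp only [hf, Bool.not_true, Bool.false_eq_true, if_false, hgt, htn]
        rw [cooldownGo_true flags _ out i hi hf]
        set skip : Nat := (max cd 0).toNat with hskip
        have hsplit : List.drop (i + 1) flags
            = List.take skip (List.drop (i + 1) flags)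
              ++ List.drop (i + 1 + skip) flags := by
          have h1 := (List.take_append_drop skip (List.drop (i + 1) flags)).symm
          rwa [List.drop_drop] at h1
        rw [hsplit, PySem.List.enumerate_append, List.foldl_append]
        set t := List.take skip (List.drop (i + 1) flags) with ht
        have hskipcast : (skip : Int) = max cd 0 := by
          rw [hskip, Int.toNat_of_nonneg (le_max_right cd 0)]
        have hblock :
            (PySem.List.enumerate t ((i : Int) + 1)).foldl
              (fun (st : List Bool × Int) (p : Int × Bool) =>
                if !p.2 then st
                else if p.1 - st.2 ≤ cd then st
                else (st.1.set p.1.toNat true, p.1))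
              (out.set i true, (i : Int)) = (out.set i true, (i : Int)) := by
          by_cases hcd : 0 ≤ cd
          · apply cd_blocked
            have h1 : t.length ≤ skip := by
              rw [ht]; exact List.length_take_le _ _
            have h2 : (t.length : Int) ≤ (skip : Int) := by exact_mod_cast h1
            rw [hskipcast, max_eq_left hcd] at h2
            omega
          · have hsk0 : skip = 0 := by
              rw [hskip, max_eq_right (by omega : cd ≤ 0)]; rfl
            rw [ht, hsk0, List.take_zero, PySem.List.enumerate_nil, List.foldl_nil]
        rw [hblock]
        by_cases hlen : i + 1 + skip ≤ flags.length
        · have htlen : t.length = skip := by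
            rw [ht, List.length_take, List.length_drop]; omega
          have hdropeq : List.drop (i + 1 + skip) flags = List.drop (i + skip + 1) flags := by
            congr 1; omega
          have hstart : (i : Int) + 1 + (t.length : Int) = ((i + skip + 1 : Nat) : Int) := by
            rw [htlen]; push_cast; ring
          rw [hdropeq, hstart]
          exact ih (i + skip + 1) (out.set i true) (i : Int)
            (by omega)
            (by
              have : cd ≤ (skip : Int) := by rw [hskipcast]; exact le_max_left cd 0
              push_cast; omega)
        · have hdnil : List.drop (i + 1 + skip) flags = [] :=
            List.drop_eq_nil_of_le (by omega)
          have hend : ¬ i + skip + 1 < flags.length := by omega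
          rw [hdnil, PySem.List.enumerate_nil, List.foldl_nil,
            cooldownGo_of_ge _ _ _ _ hend]
      · -- flag false: both move to i+1 with unchanged state
        have hf' : flags[i] = false := by simpa using hf
        simp only [hf', Bool.not_false, if_true]
        rw [cooldownGo_false flags _ out i hi hf']
        have hcast : (i : Int) + 1 = ((i + 1 : Nat) : Int) := by push_cast; ring
        rw [hcast]
        exact ih (i + 1) out li (by omega) (by push_cast; omega)
    · rw [List.drop_eq_nil_of_le (by omega), cooldownGo_of_ge _ _ _ _ hi]
      simp [PySem.List.enumerate_nil]

-- ===== VERDICT =====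
theorem cooldown_events_spec : Claim_equal_cooldown_events := by
  intro flags cooldown _
  unfold Spec_cooldown_events cooldown_events cooldown_events_alt
  have h := cd_main cooldown flags flags.length 0 (List.replicate flags.length false)
    (-cooldown - 1) (by omega) (by omega)
  simp only [List.drop_zero, Nat.cast_zero] at h
  have hmap : flags.map (fun _ => false) = List.replicate flags.length false := by
    simp
  rw [hmap]
  exact h
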